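-- pv_equiv track=rewrite | github.com/wu-lichao/LLM_Review_Tracer | pipeline.py | zwc_encode
-- ===== SOURCE A (Python) =====
-- ZWC_0   = '\u200b'   # zero-width space         → bit 0
--
-- ZWC_1   = '\u200c'   # zero-width non-joiner    → bit 1
--
-- ZWC_SEP = '\u200d'   # zero-width joiner        → char separator
--
-- def zwc_encode(text: str) -> str:
--     """Encode a string as a ZWC sequence (8 bits per ASCII char, LSB first).
--
--     Each bit is followed immediately by ZWC_SEP so the PDF text layer never
--     contains two consecutive identical ZWC codepoints — which PyMuPDF collapses
--     into one during extraction.  Layout per character: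
--         [bit0 SEP bit1 SEP bit2 SEP bit3 SEP bit4 SEP bit5 SEP bit6 SEP bit7 SEP]
--     Total: 16 codepoints per character (vs 9 in the old scheme).
--     The BOM header is omitted because U+FEFF is filtered by Arial on some builds.
--     """
--     out = []
--     for ch in text:
--         byte = ord(ch) & 0xFF
--         for i in range(8):
--             out.append(ZWC_1 if (byte >> i) & 1 else ZWC_0)
--             out.append(ZWC_SEP)        # separator after every bit → no runs
--     return ''.join(out)
-- ===== SOURCE B (Python) =====
-- ZWC_0   = '\u200b'
-- ZWC_1   = '\u200c'
-- ZWC_SEP = '\u200d'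
--
-- # 256-entry table: entry b is the full 16-codepoint ZWC string for byte b (LSB first, SEP after every bit)
-- _ZWC_TABLE = [
--     ''.join((ZWC_1 if (b >> i) & 1 else ZWC_0) + ZWC_SEP for i in range(8))
--     for b in range(256)
-- ]
--
-- def zwc_encode(text: str) -> str:
--     return ''.join(_ZWC_TABLE[ord(ch) & 0xFF] for ch in text)
-- ===== Notes on version B (the rewrite author's own statement) =====
-- stated objective: faster
-- what changed: Replaces the per-character 8-iteration bit loop with a 256-entry table of precomputed 16-codepoint ZWC strings built once at module load; encoding is then a single pass joining one table lookup per character.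
import Mathlib
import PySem

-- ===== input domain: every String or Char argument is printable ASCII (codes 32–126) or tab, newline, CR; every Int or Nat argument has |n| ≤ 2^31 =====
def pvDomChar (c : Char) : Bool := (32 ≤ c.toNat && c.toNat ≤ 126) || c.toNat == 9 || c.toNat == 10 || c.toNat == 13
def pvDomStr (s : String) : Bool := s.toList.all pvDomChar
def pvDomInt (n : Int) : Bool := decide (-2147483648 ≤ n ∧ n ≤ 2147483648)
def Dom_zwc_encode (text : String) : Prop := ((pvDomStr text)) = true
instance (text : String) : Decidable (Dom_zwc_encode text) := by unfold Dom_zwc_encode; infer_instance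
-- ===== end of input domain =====

-- B replaces A's per-character bit loop by a 256-entry table of precomputed ZWC blocks, looked up once per character (objective: faster, constant-factor).

-- ===== PORT A =====
-- out is accumulated as a List Char (each Python append pushes a single-codepoint string); ''.join = String.ofList
def zwc_encode (text : String) : String :=
  let out := text.toList.foldl (fun out ch =>
    let byte := ch.toNat &&& 0xFF
    (PySem.List.pyRange 0 8 1).foldl (fun out i =>
      (out ++ [if (byte >>> i.toNat) &&& 1 ≠ 0 then '\u200c' else '\u200b']) ++ ['\u200d']) out) []
  String.ofList out

-- ===== PORT B =====
-- the 256-entry table (built once); ''.join of the per-bit two-codepoint strings = flatten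
def zwcTable : List (List Char) :=
  (List.range 256).map (fun b =>
    ((List.range 8).map (fun i =>
      [if (b >>> i) &&& 1 ≠ 0 then '\u200c' else '\u200b', '\u200d'])).flatten)

def zwc_encode_alt (text : String) : String :=
  String.ofList ((text.toList.map (fun ch => zwcTable.getD (ch.toNat &&& 0xFF) [])).flatten)

-- ===== PRECONDITION & SPEC =====
def Spec_zwc_encode (text : String) (out : String) : Prop := out = zwc_encode_alt text
instance (text : String) (out : String) : Decidable (Spec_zwc_encode text out) := by unfold Spec_zwc_encode; infer_instance

-- ===== CLAIM (what is proved, stated in full; the proofs are below) =====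
def Claim_equal_zwc_encode : Prop := ∀ (text : String), Dom_zwc_encode text → Spec_zwc_encode text (zwc_encode text)

-- ===== LEMMAS AND PROOFS =====

-- A's inner bit loop, started from out, appends exactly B's table entry for that byte
theorem zwc_block_eq (b : Nat) (hb : b < 256) (out : List Char) :
    (PySem.List.pyRange 0 8 1).foldl (fun out i =>
      (out ++ [if (b >>> i.toNat) &&& 1 ≠ 0 then '\u200c' else '\u200b']) ++ ['\u200d']) out
    = out ++ zwcTable.getD b [] := by
  have h : zwcTable.getD b [] =
      ((List.range 8).map (fun i =>
        [if (b >>> i) &&& 1 ≠ 0 then '\u200c' else '\u200b', '\u200d'])).flatten := by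
    simp [zwcTable, List.getD_eq_getElem?_getD, hb]
  rw [h, show PySem.List.pyRange 0 8 1 = [0,1,2,3,4,5,6,7] from by decide]
  simp [List.range_succ]

theorem zwc_loop_eq (cs : List Char) (out : List Char) (hcs : ∀ c ∈ cs, c.toNat &&& 0xFF < 256) :
    cs.foldl (fun out ch =>
      (PySem.List.pyRange 0 8 1).foldl (fun out i =>
        (out ++ [if ((ch.toNat &&& 0xFF) >>> i.toNat) &&& 1 ≠ 0 then '\u200c' else '\u200b']) ++ ['\u200d']) out) out
    = out ++ (cs.map (fun ch => zwcTable.getD (ch.toNat &&& 0xFF) [])).flatten := by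
  induction cs generalizing out with
  | nil => simp
  | cons c cs ih =>
    simp only [List.foldl_cons, List.map_cons, List.flatten_cons]
    rw [zwc_block_eq _ (hcs c (by simp)) out, ih _ (fun x hx => hcs x (by simp [hx]))]
    simp

-- ===== VERDICT (by name: the statement is the Claim_ definition above) =====
theorem zwc_encode_spec : Claim_equal_zwc_encode := by
  intro text _
  show zwc_encode text = zwc_encode_alt text
  show String.ofList (text.toList.foldl (fun out ch =>
      (PySem.List.pyRange 0 8 1).foldl (fun out i =>
        (out ++ [if ((ch.toNat &&& 0xFF) >>> i.toNat) &&& 1 ≠ 0 then '\u200c' else '\u200b']) ++ ['\u200d']) out) [])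
    = zwc_encode_alt text
  unfold zwc_encode_alt
  rw [zwc_loop_eq text.toList [] (fun c _ => Nat.lt_of_le_of_lt (Nat.and_le_right) (by norm_num))]
  simp
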